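-- pv_equiv track=rewrite | github.com/pypi-data/pypi-mirror-404 | packages/justjit/justjit-0.1.6.tar.gz/justjit-0.1.6/benchmark.py | branch_heavy_py
-- ===== SOURCE A (Python) =====
-- def branch_heavy_py(n):
--     total = 0
--     i = 0
--     while i < n:
--         if i % 2 == 0:
--             total = total + i
--         else:
--             total = total - 1
--         i = i + 1
--     return total
-- ===== SOURCE B (Python) =====
-- def branch_heavy_py(n):
--     # closed form: evens 0,2,... below n sum to e*(e-1) with e = (n+1)//2;
--     # odds below n number n//2, each subtracting 1
--     if n <= 0:
--         return 0
--     e = (n + 1) // 2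
--     o = n // 2
--     return e * (e - 1) - o
-- ===== Notes on version B (the rewrite author's own statement) =====
-- stated objective: faster
-- what changed: Replaced the O(n) while-loop accumulation with the O(1) closed form e*(e-1)-o where e=(n+1)//2 counts the even indices below n and o=n//2 the odd ones.
import Mathlib
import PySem

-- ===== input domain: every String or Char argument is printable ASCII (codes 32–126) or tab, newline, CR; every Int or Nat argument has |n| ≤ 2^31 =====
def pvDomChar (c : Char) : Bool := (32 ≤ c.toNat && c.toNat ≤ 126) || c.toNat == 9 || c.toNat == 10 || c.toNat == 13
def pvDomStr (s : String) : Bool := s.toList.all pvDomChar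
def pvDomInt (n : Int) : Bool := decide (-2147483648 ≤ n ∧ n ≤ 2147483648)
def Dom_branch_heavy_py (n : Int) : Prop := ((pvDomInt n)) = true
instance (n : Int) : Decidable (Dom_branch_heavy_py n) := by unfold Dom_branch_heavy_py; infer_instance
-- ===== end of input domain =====

-- B replaces A's O(n) while-loop with the O(1) closed form e*(e-1)-o, e=(n+1)//2, o=n//2.


-- ===== PORT A =====
-- the while loop: state (total, i), runs while i < n
def pvLoopA (n total i : Int) : Int :=
  if _h : i < n then
    pvLoopA n (if PySem.Int.mod i 2 = 0 then total + i else total - 1) (i + 1)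
  else total
termination_by (n - i).toNat
decreasing_by omega

def branch_heavy_py (n : Int) : Int := pvLoopA n 0 0

-- ===== PORT B =====
def branch_heavy_py_alt (n : Int) : Int :=
  if n ≤ 0 then 0
  else
    let e := PySem.Int.floordiv (n + 1) 2
    let o := PySem.Int.floordiv n 2
    e * (e - 1) - o

-- ===== PRECONDITION & SPEC =====
def Spec_branch_heavy_py (n : Int) (out : Int) : Prop := out = branch_heavy_py_alt n
instance (n : Int) (out : Int) : Decidable (Spec_branch_heavy_py n out) := by unfold Spec_branch_heavy_py; infer_instance

-- ===== CLAIM (what is proved, stated in full; the proofs are below) =====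
def Claim_equal_branch_heavy_py : Prop := ∀ (n : Int), Dom_branch_heavy_py n → Spec_branch_heavy_py n (branch_heavy_py n)

-- ===== LEMMAS AND PROOFS =====

-- closed-form prefix value: F k = e*(e-1) - o with e=(k+1)//2, o=k//2
def pvF (k : Int) : Int :=
  PySem.Int.floordiv (k + 1) 2 * (PySem.Int.floordiv (k + 1) 2 - 1) - PySem.Int.floordiv k 2

lemma pvF_step (i : Int) (h0 : 0 ≤ i) :
    pvF (i + 1) = pvF i + (if PySem.Int.mod i 2 = 0 then i else -1) := by
  have hmod : PySem.Int.mod i 2 = i % 2 := PySem.Int.mod_eq_emod_of_pos (by norm_num)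
  rcases Int.even_or_odd i with ⟨m, hm⟩ | ⟨m, hm⟩
  · have e1 : PySem.Int.floordiv (i + 1) 2 = m := by
      rw [PySem.Int.floordiv_eq_iff_of_pos (by norm_num)]; omega
    have e2 : PySem.Int.floordiv (i + 1 + 1) 2 = m + 1 := by
      rw [PySem.Int.floordiv_eq_iff_of_pos (by norm_num)]; omega
    have o1 : PySem.Int.floordiv i 2 = m := by
      rw [PySem.Int.floordiv_eq_iff_of_pos (by norm_num)]; omega
    have hif : PySem.Int.mod i 2 = 0 := by rw [hmod]; omega
    simp only [pvF, e1, e2, o1, if_pos hif]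
    subst hm; ring
  · have e1 : PySem.Int.floordiv (i + 1) 2 = m + 1 := by
      rw [PySem.Int.floordiv_eq_iff_of_pos (by norm_num)]; omega
    have e2 : PySem.Int.floordiv (i + 1 + 1) 2 = m + 1 := by
      rw [PySem.Int.floordiv_eq_iff_of_pos (by norm_num)]; omega
    have o1 : PySem.Int.floordiv i 2 = m := by
      rw [PySem.Int.floordiv_eq_iff_of_pos (by norm_num)]; omega
    have o2 : PySem.Int.floordiv (i + 1) 2 = m + 1 := e1
    have hif : ¬ PySem.Int.mod i 2 = 0 := by rw [hmod]; omega
    simp only [pvF, e1, e2, o1, if_neg hif]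
    ring

lemma pvLoopA_eq (n : Int) : ∀ fuel i total, (n - i).toNat ≤ fuel → 0 ≤ i →
    pvLoopA n total i = total + pvF (max n i) - pvF i := by
  intro fuel
  induction fuel with
  | zero =>
    intro i total hf h0
    have hni : ¬ i < n := by omega
    have hm : max n i = i := by omega
    rw [pvLoopA, dif_neg hni, hm]; ring
  | succ k ih =>
    intro i total hf h0
    rw [pvLoopA]
    by_cases hin : i < n
    · rw [dif_pos hin]
      have hstep := pvF_step i h0
      have hm : max n (i + 1) = max n i := by omega
      by_cases hp : PySem.Int.mod i 2 = 0
      · rw [if_pos hp, ih (i + 1) (total + i) (by omega) (by omega), hm]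
        rw [if_pos hp] at hstep; omega
      · rw [if_neg hp, ih (i + 1) (total - 1) (by omega) (by omega), hm]
        rw [if_neg hp] at hstep; omega
    · rw [dif_neg hin]
      have hm : max n i = i := by omega
      rw [hm]; ring

lemma pvF_zero : pvF 0 = 0 := by decide

-- ===== VERDICT (by name: the statement is the Claim_ definition above) =====
theorem branch_heavy_py_spec : Claim_equal_branch_heavy_py := by
  intro n _
  unfold Spec_branch_heavy_py branch_heavy_py branch_heavy_py_alt
  rw [pvLoopA_eq n (n - 0).toNat 0 0 (by omega) (by omega), pvF_zero]
  by_cases hn : n ≤ 0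
  · have hm : max n 0 = 0 := by omega
    rw [hm]; simp [hn, pvF_zero]
  · have hm : max n 0 = n := by omega
    simp [hn, hm, pvF]
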